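-- pv_equiv track=rewrite | github.com/itsdabao/RHECS | generate_viquad_eval.py | parse_error_categories
-- ===== SOURCE A (Python) =====
-- from typing import Iterable, Literal, Optional
--
-- HALLUCINATION_CATEGORIES = [
--     "ENTITY_ERROR",
--     "RELATION_ERROR",
--     "CONTRADICTORY",
--     "UNVERIFIABLE",
--     "FABRICATED",
-- ]
--
-- def _dedupe_keep_order(items: Iterable[str]) -> list[str]:
--     seen = set()
--     output: list[str] = []
--     for item in items:
--         if item and item not in seen:
--             seen.add(item)
--             output.append(item)
--     return output
--
-- def _parse_csv_models(raw_value: str) -> list[str]: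
--     if not raw_value:
--         return []
--     return [part.strip() for part in raw_value.split(",") if part.strip()]
--
-- def parse_error_categories(raw_value: str) -> list[str]:
--     categories = _parse_csv_models(raw_value)
--     if not categories:
--         return list(HALLUCINATION_CATEGORIES)
--
--     normalized = []
--     for category in categories:
--         c = category.strip().upper()
--         if c not in HALLUCINATION_CATEGORIES:
--             raise ValueError(
--                 f"Category không hợp lệ: {category}. Hợp lệ: {', '.join(HALLUCINATION_CATEGORIES)}"
--             )
--         normalized.append(c)
--
--     return _dedupe_keep_order(normalized)
-- ===== SOURCE B (Python) =====
-- HALLUCINATION_CATEGORIES = [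
--     "ENTITY_ERROR",
--     "RELATION_ERROR",
--     "CONTRADICTORY",
--     "UNVERIFIABLE",
--     "FABRICATED",
-- ]
--
-- def parse_error_categories(raw_value: str) -> list[str]:
--     # Tokenize once, validate, then SELECT from the fixed vocabulary:
--     # instead of a seen-set dedupe over the input, take the categories that
--     # occur and order them by their first occurrence position.
--     tokens = [p.strip() for p in raw_value.split(",") if p.strip()]
--     if not tokens:
--         return list(HALLUCINATION_CATEGORIES)
--     for name in tokens:
--         if name.upper() not in HALLUCINATION_CATEGORIES:
--             raise ValueError(
--                 f"Category không hợp lệ: {name}. Hợp lệ: {', '.join(HALLUCINATION_CATEGORIES)}"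
--             )
--     uppers = [name.upper() for name in tokens]
--     return sorted((c for c in HALLUCINATION_CATEGORIES if c in uppers), key=uppers.index)
-- ===== Notes on version B (the rewrite author's own statement) =====
-- stated objective: alternative
-- what changed: A dedupes by scanning the input with a seen-set accumulator (after two helper passes); B instead tokenizes and validates once, then builds the result by selecting from the fixed 5-element category vocabulary the categories that occur and stable-sorting them by their first-occurrence index, so no seen-set or dedupe pass exists.
import Mathlib
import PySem

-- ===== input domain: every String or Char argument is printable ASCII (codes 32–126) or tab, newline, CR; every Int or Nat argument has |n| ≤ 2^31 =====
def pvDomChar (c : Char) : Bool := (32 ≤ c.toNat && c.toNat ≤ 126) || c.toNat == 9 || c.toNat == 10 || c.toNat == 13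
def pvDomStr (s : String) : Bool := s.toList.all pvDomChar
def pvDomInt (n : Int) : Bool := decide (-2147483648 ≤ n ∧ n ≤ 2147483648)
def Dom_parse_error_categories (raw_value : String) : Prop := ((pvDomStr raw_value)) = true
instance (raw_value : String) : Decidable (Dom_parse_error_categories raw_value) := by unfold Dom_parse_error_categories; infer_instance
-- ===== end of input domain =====

-- B replaces A's seen-set dedupe over the input by a selection from the fixed category
-- vocabulary ordered (stable sort) by first-occurrence index; return-value equivalence is
-- proved (on invalid categories both raise ValueError, excluded by Pre_).

-- shared module constant HALLUCINATION_CATEGORIES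
def CATS : List String :=
  ["ENTITY_ERROR", "RELATION_ERROR", "CONTRADICTORY", "UNVERIFIABLE", "FABRICATED"]

-- ===== PORT A =====
-- raw_value.split(","): sep is non-empty, so split? is always some
def pySplitComma (raw : String) : List String := (PySem.Str.split? raw ",").getD []

-- helper _parse_csv_models
def parseCsvModels (raw : String) : List String :=
  if raw = "" then []
  else (pySplitComma raw).filterMap (fun part =>
    let s := PySem.Str.strip part
    if s = "" then none else some s)

-- A's validation loop; none = the 'raise ValueError' branch (excluded by Pre_)
def aNormalize : List String → Option (List String)
  | [] => some []
  | category :: rest =>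
    let c := PySem.Str.upper (PySem.Str.strip category)
    if c ∈ CATS then (aNormalize rest).map (c :: ·) else none

-- helper _dedupe_keep_order (loop with seen-set and output accumulator)
def dedupeGo : List String → PySem.Set String → List String → List String
  | [], _, out => out
  | item :: rest, seen, out =>
    if item ≠ "" ∧ item ∉ seen then dedupeGo rest (PySem.Set.add seen item) (out ++ [item])
    else dedupeGo rest seen out

def parse_error_categories (raw_value : String) : List String :=
  let categories := parseCsvModels raw_value
  if categories = [] then CATS
  else
    match aNormalize categories with
    | none => []          -- Python raises ValueError here; excluded by Pre_
    | some normalized => dedupeGo normalized PySem.Set.empty []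

-- ===== PORT B =====
-- B's tokenizer: strip each comma-separated part, drop empties
def bTokens (raw : String) : List String :=
  ((PySem.Str.split? raw ",").getD []).filterMap (fun p =>
    let s := PySem.Str.strip p
    if s = "" then none else some s)

def parse_error_categories_alt (raw_value : String) : List String :=
  let tokens := bTokens raw_value
  if tokens = [] then CATS
  else if tokens.all (fun name => decide (PySem.Str.upper name ∈ CATS)) then
    let uppers := tokens.map PySem.Str.upper
    PySem.List.sorted (CATS.filter (fun c => decide (c ∈ uppers)))
      (fun c => (PySem.List.index? uppers c).getD 0) false
  else []               -- Python raises ValueError here; excluded by Pre_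

-- ===== PRECONDITION & SPEC =====
-- Pre_ excludes exactly the inputs containing a non-empty part whose stripped, uppercased
-- form is not a valid category: there Python A (and B) raise ValueError.
def Pre_parse_error_categories (raw_value : String) : Prop :=
  ∀ p ∈ (PySem.Str.split? raw_value ",").getD [],
    PySem.Str.strip p = "" ∨ PySem.Str.upper (PySem.Str.strip p) ∈ CATS
instance (raw_value : String) : Decidable (Pre_parse_error_categories raw_value) := by
  unfold Pre_parse_error_categories; infer_instance

def pvWitness_parse_error_categories : String := "entity_error, FABRICATED ,entity_error"

def Spec_parse_error_categories (raw_value : String) (out : List String) : Prop :=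
  out = parse_error_categories_alt raw_value
instance (raw_value : String) (out : List String) : Decidable (Spec_parse_error_categories raw_value out) := by
  unfold Spec_parse_error_categories; infer_instance

-- ===== CLAIM =====
def Claim_equal_parse_error_categories : Prop :=
  ∀ (raw_value : String), Dom_parse_error_categories raw_value →
    Pre_parse_error_categories raw_value →
    Spec_parse_error_categories raw_value (parse_error_categories raw_value)

-- ===== LEMMAS AND PROOFS =====

theorem dropWhile_prefix_self (p : Char → Bool) (a b : List Char) (hab : b <+: a)
    (ha : List.dropWhile p a = a) : List.dropWhile p b = b := by
  rw [List.dropWhile_eq_self_iff] at ha ⊢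
  intro hl
  have h0 := hab.getElem (i := 0) hl
  rw [h0]
  exact ha (lt_of_lt_of_le hl hab.length_le)

theorem rstrip_prefix (l : List Char) : PySem.Chars.rstrip l <+: l := by
  unfold PySem.Chars.rstrip
  have h := List.dropWhile_suffix (l := l.reverse) (p := PySem.Chars.isspace)
  have := List.reverse_prefix.mpr h
  simpa using this

theorem rstrip_idem (l : List Char) :
    PySem.Chars.rstrip (PySem.Chars.rstrip l) = PySem.Chars.rstrip l := by
  unfold PySem.Chars.rstrip
  rw [List.reverse_reverse, List.dropWhile_idempotent]

-- Python's str.strip is idempotent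
theorem strip_idem (s : List Char) :
    PySem.Chars.strip (PySem.Chars.strip s) = PySem.Chars.strip s := by
  unfold PySem.Chars.strip PySem.Chars.lstrip
  rw [dropWhile_prefix_self _ _ _ (rstrip_prefix _) (List.dropWhile_idempotent ..), rstrip_idem]

theorem str_strip_idem (s : String) :
    PySem.Str.strip (PySem.Str.strip s) = PySem.Str.strip s := by
  unfold PySem.Str.strip
  rw [String.toList_ofList, strip_idem]

-- valid categories are non-empty strings
theorem mem_CATS_ne_empty (c : String) (hc : c ∈ CATS) : c ≠ "" := by
  simp only [CATS, List.mem_cons] at hc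
  rcases hc with rfl | rfl | rfl | rfl | rfl | h <;> first | decide | simp at h

theorem nodup_CATS : CATS.Nodup := by decide

theorem aNormalize_cons (x : String) (l : List String) :
    aNormalize (x :: l) =
      if PySem.Str.upper (PySem.Str.strip x) ∈ CATS then
        (aNormalize l).map ((PySem.Str.upper (PySem.Str.strip x)) :: ·)
      else none := by
  simp only [aNormalize]

-- A's validation loop succeeds on valid input and returns the uppercased strips
theorem aNormalize_valid (l : List String)
    (h : ∀ x ∈ l, PySem.Str.upper (PySem.Str.strip x) ∈ CATS) :
    aNormalize l = some (l.map (fun x => PySem.Str.upper (PySem.Str.strip x))) := by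
  induction l with
  | nil => rfl
  | cons x rest ih =>
    rw [aNormalize_cons, if_pos (h x List.mem_cons_self),
      ih (fun y hy => h y (List.mem_cons_of_mem _ hy))]
    rfl

-- proof-only model of the dedupe loop, with a plain list as the seen set
def keep : List String → List String → List String
  | [], _ => []
  | x :: r, seen => if x ∈ seen then keep r seen else x :: keep r (x :: seen)

theorem dedupeGo_cons (item : String) (rest : List String) (seen : PySem.Set String)
    (out : List String) :
    dedupeGo (item :: rest) seen out =
      if item ≠ "" ∧ item ∉ seen then
        dedupeGo rest (PySem.Set.add seen item) (out ++ [item])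
      else dedupeGo rest seen out := by
  simp only [dedupeGo]

theorem dedupeGo_eq_keep (l : List String) (seen₁ : PySem.Set String) (seen₂ out : List String)
    (hne : ∀ x ∈ l, x ≠ "") (hmem : ∀ y, y ∈ seen₁ ↔ y ∈ seen₂) :
    dedupeGo l seen₁ out = out ++ keep l seen₂ := by
  induction l generalizing seen₁ seen₂ out with
  | nil => simp [dedupeGo, keep]
  | cons x r ih =>
    rw [dedupeGo_cons]
    by_cases hx : x ∈ seen₂
    · rw [if_neg (by simp [(hmem x).mpr hx]), keep, if_pos hx]
      exact ih seen₁ seen₂ out (fun y hy => hne y (List.mem_cons_of_mem _ hy)) hmem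
    · rw [if_pos ⟨hne x List.mem_cons_self, fun h => hx ((hmem x).mp h)⟩, keep, if_neg hx]
      rw [ih (PySem.Set.add seen₁ x) (x :: seen₂) (out ++ [x])
        (fun y hy => hne y (List.mem_cons_of_mem _ hy))
        (by intro y; rw [PySem.Set.mem_add, List.mem_cons, hmem y]; tauto)]
      simp

theorem mem_keep (l seen : List String) (y : String) :
    y ∈ keep l seen ↔ y ∈ l ∧ y ∉ seen := by
  induction l generalizing seen with
  | nil => simp [keep]
  | cons x r ih =>
    rw [keep]
    by_cases hx : x ∈ seen
    · rw [if_pos hx, ih]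
      constructor
      · exact fun ⟨h1, h2⟩ => ⟨List.mem_cons_of_mem _ h1, h2⟩
      · rintro ⟨h1, h2⟩
        rcases List.mem_cons.mp h1 with rfl | h1
        · exact absurd hx h2
        · exact ⟨h1, h2⟩
    · rw [if_neg hx]
      simp only [List.mem_cons, ih, List.mem_cons]
      constructor
      · rintro (rfl | ⟨h1, h2⟩)
        · exact ⟨Or.inl rfl, hx⟩
        · exact ⟨Or.inr h1, fun h => h2 (Or.inr h)⟩
      · rintro ⟨rfl | h1, h2⟩
        · exact Or.inl rfl
        · by_cases hyx : y = x
          · exact Or.inl hyx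
          · exact Or.inr ⟨h1, fun h => by rcases h with rfl | h; exact hyx rfl; exact h2 h⟩

theorem nodup_keep (l seen : List String) : (keep l seen).Nodup := by
  induction l generalizing seen with
  | nil => simp [keep]
  | cons x r ih =>
    rw [keep]
    split
    · exact ih seen
    · exact List.nodup_cons.mpr
        ⟨fun h => ((mem_keep r (x :: seen) x).mp h).2 List.mem_cons_self, ih (x :: seen)⟩

-- the first-occurrence index, as B's sort key computes it
theorem idx_cons_of_mem_ne (y x : String) (r : List String) (hy : y ∈ r) (hne : x ≠ y) :
    ((PySem.List.index? (x :: r) y).getD 0) = ((PySem.List.index? r y).getD 0) + 1 := by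
  obtain ⟨k, hk⟩ := Option.isSome_iff_exists.mp ((PySem.List.index?_isSome_iff r y).mpr hy)
  rw [PySem.List.index?_cons_of_ne (v := y) (xs := r) hne, hk]
  rfl

-- keep's output is strictly increasing in first-occurrence index
theorem pairwise_keep (l seen : List String) :
    (keep l seen).Pairwise
      (fun a b => (PySem.List.index? l a).getD 0 < (PySem.List.index? l b).getD 0) := by
  induction l generalizing seen with
  | nil => simp [keep]
  | cons x r ih =>
    rw [keep]
    by_cases hx : x ∈ seen
    · rw [if_pos hx]
      refine (ih seen).imp_of_mem ?_
      intro a b ha hb hab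
      obtain ⟨ha1, ha2⟩ := (mem_keep r seen a).mp ha
      obtain ⟨hb1, hb2⟩ := (mem_keep r seen b).mp hb
      have hax : x ≠ a := fun h => ha2 (h ▸ hx)
      have hbx : x ≠ b := fun h => hb2 (h ▸ hx)
      rw [idx_cons_of_mem_ne a x r ha1 hax, idx_cons_of_mem_ne b x r hb1 hbx]
      omega
    · rw [if_neg hx]
      refine List.pairwise_cons.mpr ⟨?_, ?_⟩
      · intro y hy
        obtain ⟨hy1, hy2⟩ := (mem_keep r (x :: seen) y).mp hy
        have hyx : x ≠ y := fun h => hy2 (h ▸ List.mem_cons_self)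
        rw [PySem.List.index?_cons_self, idx_cons_of_mem_ne y x r hy1 hyx]
        simp
      · refine (ih (x :: seen)).imp_of_mem ?_
        intro a b ha hb hab
        obtain ⟨ha1, ha2⟩ := (mem_keep r (x :: seen) a).mp ha
        obtain ⟨hb1, hb2⟩ := (mem_keep r (x :: seen) b).mp hb
        have hax : x ≠ a := fun h => ha2 (h ▸ List.mem_cons_self)
        have hbx : x ≠ b := fun h => hb2 (h ▸ List.mem_cons_self)
        rw [idx_cons_of_mem_ne a x r ha1 hax, idx_cons_of_mem_ne b x r hb1 hbx]
        omega

-- the heart of the equivalence: A's seen-set dedupe equals B's "select from CATS,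
-- stable-sort by first-occurrence index"
theorem dedupe_eq_sorted (ns : List String) (h : ∀ x ∈ ns, x ∈ CATS) :
    dedupeGo ns PySem.Set.empty [] =
      PySem.List.sorted (CATS.filter (fun c => decide (c ∈ ns)))
        (fun c => (PySem.List.index? ns c).getD 0) false := by
  rw [dedupeGo_eq_keep ns PySem.Set.empty [] []
      (fun x hx => mem_CATS_ne_empty x (h x hx)) (by simp [PySem.Set.empty]),
    List.nil_append]
  refine (PySem.List.sorted_eq_of_perm_of_pairwise_lt _ _ _ ?_ (pairwise_keep ns [])).symm
  refine (List.perm_ext_iff_of_nodup (nodup_keep ns []) (nodup_CATS.filter _)).mpr ?_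
  intro y
  rw [mem_keep, List.mem_filter]
  simp only [List.not_mem_nil, not_false_iff, and_true, decide_eq_true_eq]
  exact ⟨fun hy => ⟨h y hy, hy⟩, fun ⟨_, hy⟩ => hy⟩

-- ===== VERDICT =====
theorem parse_error_categories_spec : Claim_equal_parse_error_categories := by
  intro raw _hdom hpre
  unfold Spec_parse_error_categories parse_error_categories parse_error_categories_alt
  by_cases hraw : raw = ""
  · subst hraw; decide
  · have htok : parseCsvModels raw = bTokens raw := by
      simp only [parseCsvModels, pySplitComma, bTokens, if_neg hraw]
    simp only [htok]
    set tokens := bTokens raw with htokens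
    have hstrip : ∀ t ∈ tokens, PySem.Str.strip t = t := by
      intro t ht
      rw [htokens, bTokens, List.mem_filterMap] at ht
      obtain ⟨p, _, hpt⟩ := ht
      by_cases hs : PySem.Str.strip p = "" <;> simp only [hs, reduceIte] at hpt
      · exact absurd hpt (by simp)
      · obtain rfl : t = PySem.Str.strip p := (Option.some.injEq ..).mp hpt.symm
        exact str_strip_idem p
    have hval : ∀ t ∈ tokens, PySem.Str.upper (PySem.Str.strip t) ∈ CATS := by
      intro t ht
      have hmem := ht
      rw [htokens, bTokens, List.mem_filterMap] at hmem
      obtain ⟨p, hp, hpt⟩ := hmem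
      by_cases hs : PySem.Str.strip p = "" <;> simp only [hs, reduceIte] at hpt
      · exact absurd hpt (by simp)
      · obtain rfl : t = PySem.Str.strip p := (Option.some.injEq ..).mp hpt.symm
        rw [str_strip_idem]
        exact (hpre p hp).resolve_left hs
    by_cases hnil : tokens = []
    · rw [if_pos hnil, if_pos hnil]
    · rw [if_neg hnil, if_neg hnil,
        if_pos (List.all_eq_true.mpr (fun t ht => by
          rw [decide_eq_true_eq, ← hstrip t ht]; exact hval t ht))]
      rw [aNormalize_valid tokens hval,
        List.map_congr_left (fun t ht => by rw [hstrip t ht] :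
          ∀ t ∈ tokens, PySem.Str.upper (PySem.Str.strip t) = PySem.Str.upper t)]
      exact dedupe_eq_sorted (tokens.map PySem.Str.upper)
        (fun x hx => by
          obtain ⟨t, ht, rfl⟩ := List.mem_map.mp hx
          rw [← hstrip t ht]; exact hval t ht)
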